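-- pv_equiv track=rewrite | github.com/guilherme-machado-ceo/qualia-hub-ecosystem | lattice/profile_lattice.py | find_anomaly_neighbors
-- ===== SOURCE A (Python) =====
-- from typing import Dict, FrozenSet, Iterator, List, Optional, Tuple
-- from itertools import product
--
-- NUM_DIMS = 6
--
-- def generate_all_profiles() -> List[Tuple[int, ...]]:
--     """Generate all 64 binary profiles {0,1}^6."""
--     return list(product([0, 1], repeat=NUM_DIMS))
--
-- def hamming_distance(a: Tuple[int, ...], b: Tuple[int, ...]) -> int:
--     """Hamming distance between two profiles."""
--     return sum(ai != bi for ai, bi in zip(a, b))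
--
-- def is_consistent(sigma: Tuple[int, ...]) -> bool:
--     """Check if profile is consistent (respects implication chain).
--
--     sigma is consistent iff: for all k in 2..6:
--         sigma_k = 1 implies sigma_{k-1} = 1
--     """
--     return all(
--         sigma[k] <= sigma[k - 1]
--         for k in range(1, NUM_DIMS)
--     )
--
-- def find_anomaly_neighbors(
--     sigma: Tuple[int, ...],
--     max_distance: int = 2,
-- ) -> List[Tuple[int, Tuple[int, ...]]]:
--     """Find nearest consistent profiles to an anomalous one.
--
--     Returns list of (distance, profile) sorted by distance.
--     """
--     all_profiles = generate_all_profiles()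
--     neighbors = []
--     for p in all_profiles:
--         if is_consistent(p):
--             d = hamming_distance(sigma, p)
--             if d <= max_distance:
--                 neighbors.append((d, p))
--     neighbors.sort()
--     return neighbors
-- ===== SOURCE B (Python) =====
-- NUM_DIMS = 6
--
-- def hamming_distance(a, b):
--     """Hamming distance between two profiles."""
--     return sum(ai != bi for ai, bi in zip(a, b))
--
-- def find_anomaly_neighbors(sigma, max_distance=2):
--     # A consistent profile is exactly k leading ones followed by zeros,
--     # so build the 7 candidates directly instead of scanning all 64 profiles.
--     neighbors = []
--     for k in range(NUM_DIMS + 1):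
--         p = tuple(1 if i < k else 0 for i in range(NUM_DIMS))
--         d = hamming_distance(sigma, p)
--         if d <= max_distance:
--             neighbors.append((d, p))
--     neighbors.sort()
--     return neighbors
-- ===== Notes on version B (the rewrite author's own statement) =====
-- stated objective: simpler
-- what changed: B constructs the 7 consistent profiles directly (k leading ones, k=0..6) instead of generating all 64 binary profiles and filtering them with an is_consistent scan.
import Mathlib
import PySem

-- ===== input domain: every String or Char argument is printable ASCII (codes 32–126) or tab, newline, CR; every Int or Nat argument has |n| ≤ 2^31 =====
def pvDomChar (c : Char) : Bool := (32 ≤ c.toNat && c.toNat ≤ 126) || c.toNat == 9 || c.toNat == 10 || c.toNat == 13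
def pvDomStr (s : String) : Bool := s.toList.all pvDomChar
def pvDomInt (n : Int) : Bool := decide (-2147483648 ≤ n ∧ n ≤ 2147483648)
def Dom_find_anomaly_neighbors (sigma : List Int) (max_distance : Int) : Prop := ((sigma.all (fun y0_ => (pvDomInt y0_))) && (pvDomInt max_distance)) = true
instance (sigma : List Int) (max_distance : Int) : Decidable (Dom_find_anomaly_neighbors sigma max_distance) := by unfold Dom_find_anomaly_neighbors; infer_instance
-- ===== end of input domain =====

-- B builds the 7 consistent profiles (k leading ones) directly instead of filtering all 64 binary profiles; same sorted result.


-- ===== PORT A =====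
-- itertools.product([0,1], repeat=n) in CPython order (rightmost varies fastest)
def generate_profiles : Nat → List (List Int)
  | 0 => [[]]
  | n + 1 => (generate_profiles n).flatMap (fun t => [t ++ [0], t ++ [1]])

-- shared module helper (identical code in Source A and Source B): sum(ai != bi for ai, bi in zip(a, b))
def hamming_distance (a b : List Int) : Int :=
  ((a.zip b).map (fun p => if p.1 ≠ p.2 then (1 : Int) else 0)).sum

-- all(sigma[k] <= sigma[k-1] for k in range(1, NUM_DIMS)); only called on length-6 profiles
def is_consistent (p : List Int) : Bool :=
  (PySem.List.pyRange 1 6 1).all (fun k =>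
    decide (PySem.List.pyGetD p k 0 ≤ PySem.List.pyGetD p (k - 1) 0))

def find_anomaly_neighbors (sigma : List Int) (max_distance : Int) : List (Int × List Int) :=
  let all_profiles := generate_profiles 6
  let neighbors := all_profiles.foldl
    (fun acc p =>
      if is_consistent p then
        (let d := hamming_distance sigma p
         if d ≤ max_distance then acc ++ [(d, p)] else acc)
      else acc) []
  PySem.List.sorted2 neighbors (fun x => x.1) (fun x => x.2) false

-- ===== PORT B =====
def find_anomaly_neighbors_alt (sigma : List Int) (max_distance : Int) : List (Int × List Int) :=
  let neighbors := (PySem.List.pyRange 0 7 1).foldl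
    (fun acc k =>
      let p := (PySem.List.pyRange 0 6 1).map (fun i => if i < k then (1 : Int) else 0)
      let d := hamming_distance sigma p
      if d ≤ max_distance then acc ++ [(d, p)] else acc) []
  PySem.List.sorted2 neighbors (fun x => x.1) (fun x => x.2) false

-- ===== PRECONDITION & SPEC =====
def Spec_find_anomaly_neighbors (sigma : List Int) (max_distance : Int) (out : List (Int × List Int)) : Prop := out = find_anomaly_neighbors_alt sigma max_distance
instance (sigma : List Int) (max_distance : Int) (out : List (Int × List Int)) : Decidable (Spec_find_anomaly_neighbors sigma max_distance out) := by unfold Spec_find_anomaly_neighbors; infer_instance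

-- ===== CLAIM (what is proved, stated in full; the proofs are below) =====
def Claim_equal_find_anomaly_neighbors : Prop := ∀ (sigma : List Int) (max_distance : Int), Dom_find_anomaly_neighbors sigma max_distance → Spec_find_anomaly_neighbors sigma max_distance (find_anomaly_neighbors sigma max_distance)

-- ===== LEMMAS AND PROOFS =====
-- the seven consistent profiles, in the order A's filtered scan meets them (= B's k = 0..6 order)
def sevenProfiles : List (List Int) :=
  [[0,0,0,0,0,0], [1,0,0,0,0,0], [1,1,0,0,0,0], [1,1,1,0,0,0],
   [1,1,1,1,0,0], [1,1,1,1,1,0], [1,1,1,1,1,1]]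

theorem filter_consistent :
    (generate_profiles 6).filter is_consistent = sevenProfiles := by decide

theorem folds_eq (sigma : List Int) (max_distance : Int) :
    (generate_profiles 6).foldl
      (fun acc p =>
        if is_consistent p then
          (let d := hamming_distance sigma p
           if d ≤ max_distance then acc ++ [(d, p)] else acc)
        else acc) [] =
    (PySem.List.pyRange 0 7 1).foldl
      (fun acc k =>
        let p := (PySem.List.pyRange 0 6 1).map (fun i => if i < k then (1 : Int) else 0)
        let d := hamming_distance sigma p
        if d ≤ max_distance then acc ++ [(d, p)] else acc) [] := by
  rw [PySem.List.foldl_if_eq_foldl_filter, filter_consistent]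
  have h7 : PySem.List.pyRange 0 7 1 = [0, 1, 2, 3, 4, 5, 6] := by decide
  have e0 : (PySem.List.pyRange 0 6 1).map (fun i => if i < (0 : Int) then (1 : Int) else 0) = [0,0,0,0,0,0] := by decide
  have e1 : (PySem.List.pyRange 0 6 1).map (fun i => if i < (1 : Int) then (1 : Int) else 0) = [1,0,0,0,0,0] := by decide
  have e2 : (PySem.List.pyRange 0 6 1).map (fun i => if i < (2 : Int) then (1 : Int) else 0) = [1,1,0,0,0,0] := by decide
  have e3 : (PySem.List.pyRange 0 6 1).map (fun i => if i < (3 : Int) then (1 : Int) else 0) = [1,1,1,0,0,0] := by decide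
  have e4 : (PySem.List.pyRange 0 6 1).map (fun i => if i < (4 : Int) then (1 : Int) else 0) = [1,1,1,1,0,0] := by decide
  have e5 : (PySem.List.pyRange 0 6 1).map (fun i => if i < (5 : Int) then (1 : Int) else 0) = [1,1,1,1,1,0] := by decide
  have e6 : (PySem.List.pyRange 0 6 1).map (fun i => if i < (6 : Int) then (1 : Int) else 0) = [1,1,1,1,1,1] := by decide
  rw [h7]
  simp only [sevenProfiles, List.foldl_cons, List.foldl_nil, e0, e1, e2, e3, e4, e5, e6]

-- ===== VERDICT (by name: the statement is the Claim_ definition above) =====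
theorem find_anomaly_neighbors_spec : Claim_equal_find_anomaly_neighbors := by
  intro sigma max_distance _
  unfold Spec_find_anomaly_neighbors find_anomaly_neighbors find_anomaly_neighbors_alt
  exact congrArg (fun l => PySem.List.sorted2 l (fun x => x.1) (fun x => x.2) false)
    (folds_eq sigma max_distance)
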